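-- pv_equiv track=rewrite | github.com/LeoKrisK/L_nazca_components_2024 | L_nazca_components_2024/NxN_circuit/main.py | NxN_format_aij_list
-- ===== SOURCE A (Python) =====
-- def NxN_format_aij_list(all_ij_list, all_ntype_list, flip=False, st=False):
--     """
--     Used in NxN unitary matrix circuit with arbitrary design for phase shifters.
--     Formats all_ij_list so that phase shifters that connect to above the circuit
--     (hi ps) and ps that connect to below the circuit (lo ps) are symmetric in
--     left-right order.
--     """
--     all_ij_list_new = []
--     ij_hi = []
--     ij_lo = []
--     k = 0
--     i_old = None
--     for i,j in all_ij_list: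
--         if i_old != i:
--             if not flip:
--                 ij_tot = ij_hi + ij_lo[::-1]
--             else:
--                 ij_tot = ij_hi[::-1] + ij_lo
--             all_ij_list_new += ij_tot
--             ij_hi = []
--             ij_lo = []
--         if all_ntype_list[k]==0:
--                 ij_hi.append((i,j))
--         else:
--                 ij_lo.append((i,j))
--         i_old = i
--         k += 1
--     # Final iteration outside of loop:
--     if not flip:
--         ij_tot = ij_hi + ij_lo[::-1]
--     else:
--         ij_tot = ij_hi[::-1] + ij_lo
--     all_ij_list_new += ij_tot
--
--     return all_ij_list_new
-- ===== SOURCE B (Python) =====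
-- def NxN_format_aij_list(all_ij_list, all_ntype_list, flip=False, st=False):
--     # Pair each (i,j) with its ntype by positional index (IndexError still
--     # fires, like the original, if all_ntype_list is too short).
--     entries = [(ij, all_ntype_list[k]) for k, ij in enumerate(all_ij_list)]
--     out = []
--     while entries:
--         key = entries[0][0][0]
--         n = 1
--         while n < len(entries) and entries[n][0][0] == key:
--             n += 1
--         grp, entries = entries[:n], entries[n:]
--         hi = [ij for ij, t in grp if t == 0]
--         lo = [ij for ij, t in grp if t != 0]
--         out += (hi[::-1] + lo) if flip else (hi + lo[::-1])
--     return out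
-- ===== Notes on version B (the rewrite author's own statement) =====
-- stated objective: simpler
-- what changed: Replaces the sentinel i_old loop with its duplicated post-loop flush by an explicit decomposition: pair entries with their ntype by index, split into consecutive-equal-i runs, and emit each run's hi/lo partition in one place.
import Mathlib
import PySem

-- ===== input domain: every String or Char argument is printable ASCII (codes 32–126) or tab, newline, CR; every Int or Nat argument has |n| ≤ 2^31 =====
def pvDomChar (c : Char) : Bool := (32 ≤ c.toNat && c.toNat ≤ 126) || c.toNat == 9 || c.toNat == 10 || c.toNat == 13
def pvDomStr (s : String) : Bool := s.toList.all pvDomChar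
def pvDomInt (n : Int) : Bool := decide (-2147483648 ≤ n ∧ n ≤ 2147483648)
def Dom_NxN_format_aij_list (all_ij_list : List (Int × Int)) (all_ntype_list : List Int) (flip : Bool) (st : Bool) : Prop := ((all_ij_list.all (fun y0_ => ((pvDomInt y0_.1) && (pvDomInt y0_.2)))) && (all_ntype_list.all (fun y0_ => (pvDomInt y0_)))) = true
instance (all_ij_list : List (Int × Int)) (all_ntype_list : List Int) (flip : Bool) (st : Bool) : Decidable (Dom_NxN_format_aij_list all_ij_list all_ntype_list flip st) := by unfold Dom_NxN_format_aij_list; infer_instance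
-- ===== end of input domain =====

-- B replaces A's sentinel i_old loop (with its duplicated post-loop flush) by an explicit
-- run-splitting decomposition over index-paired entries; objective: simpler.


-- ===== PORT A =====
-- step of A's for-loop; state = (all_ij_list_new, ij_hi, ij_lo, k, i_old).
-- all_ntype_list[k] is ported with pyGetD (default never reached under Pre_, which
-- excludes the IndexError inputs).
def pvStepA (all_ntype_list : List Int) (flip : Bool)
    (acc : List (Int × Int) × List (Int × Int) × List (Int × Int) × Int × Option Int)
    (ij : Int × Int) :
    List (Int × Int) × List (Int × Int) × List (Int × Int) × Int × Option Int :=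
  let fl :=
    if acc.2.2.2.2 ≠ some ij.1 then
      (acc.1 ++ (if !flip then acc.2.1 ++ acc.2.2.1.reverse else acc.2.1.reverse ++ acc.2.2.1),
       ([] : List (Int × Int)), ([] : List (Int × Int)))
    else (acc.1, acc.2.1, acc.2.2.1)
  let hl :=
    if PySem.List.pyGetD all_ntype_list acc.2.2.2.1 0 == 0 then
      (fl.2.1 ++ [ij], fl.2.2)
    else (fl.2.1, fl.2.2 ++ [ij])
  (fl.1, hl.1, hl.2, acc.2.2.2.1 + 1, some ij.1)

def NxN_format_aij_list (all_ij_list : List (Int × Int)) (all_ntype_list : List Int) (flip : Bool) (st : Bool) : List (Int × Int) :=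
  let s := all_ij_list.foldl (pvStepA all_ntype_list flip) ([], [], [], 0, none)
  -- final flush outside of loop
  s.1 ++ (if !flip then s.2.1 ++ s.2.2.1.reverse else s.2.1.reverse ++ s.2.2.1)

-- ===== PORT B =====
-- the inner while loop of Source B: split off the leading run of entries whose i equals key
def pvSplitRun (key : Int) : List ((Int × Int) × Int) → List ((Int × Int) × Int) × List ((Int × Int) × Int)
  | [] => ([], [])
  | e :: rest =>
    if e.1.1 == key then
      let p := pvSplitRun key rest
      (e :: p.1, p.2)
    else ([], e :: rest)

theorem pvSplitRun_snd_length (key : Int) (l : List ((Int × Int) × Int)) :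
    (pvSplitRun key l).2.length ≤ l.length := by
  induction l with
  | nil => simp [pvSplitRun]
  | cons e rest ih =>
    simp only [pvSplitRun]
    split
    · simpa using Nat.le_succ_of_le ih
    · simp

-- the outer while loop of Source B: the consecutive-equal-i run decomposition
def pvRuns : List ((Int × Int) × Int) → List (List ((Int × Int) × Int))
  | [] => []
  | e :: rest =>
    (e :: (pvSplitRun e.1.1 rest).1) :: pvRuns (pvSplitRun e.1.1 rest).2
termination_by l => l.length
decreasing_by exact Nat.lt_succ_of_le (pvSplitRun_snd_length _ _)

def NxN_format_aij_list_alt (all_ij_list : List (Int × Int)) (all_ntype_list : List Int) (flip : Bool) (st : Bool) : List (Int × Int) :=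
  let entries := (PySem.List.enumerate all_ij_list 0).map
    (fun p => (p.2, PySem.List.pyGetD all_ntype_list p.1 0))
  (pvRuns entries).foldl
    (fun out g =>
      let hi := (g.filter (fun e => e.2 == 0)).map (fun e => e.1)
      let lo := (g.filter (fun e => !(e.2 == 0))).map (fun e => e.1)
      out ++ (if flip then hi.reverse ++ lo else hi ++ lo.reverse))
    []

-- ===== PRECONDITION & SPEC =====
-- Pre_ excludes exactly the inputs where Python A raises IndexError:
-- all_ntype_list shorter than all_ij_list.
def Pre_NxN_format_aij_list (all_ij_list : List (Int × Int)) (all_ntype_list : List Int) (flip : Bool) (st : Bool) : Prop :=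
  all_ij_list.length ≤ all_ntype_list.length
instance (all_ij_list : List (Int × Int)) (all_ntype_list : List Int) (flip : Bool) (st : Bool) : Decidable (Pre_NxN_format_aij_list all_ij_list all_ntype_list flip st) := by unfold Pre_NxN_format_aij_list; infer_instance

def pvWitness_NxN_format_aij_list : (List (Int × Int)) × List Int × Bool × Bool :=
  ([(0, 1), (0, 2), (1, 0)], [0, 1, 0], false, false)

def Spec_NxN_format_aij_list (all_ij_list : List (Int × Int)) (all_ntype_list : List Int) (flip : Bool) (st : Bool) (out : List (Int × Int)) : Prop := out = NxN_format_aij_list_alt all_ij_list all_ntype_list flip st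
instance (all_ij_list : List (Int × Int)) (all_ntype_list : List Int) (flip : Bool) (st : Bool) (out : List (Int × Int)) : Decidable (Spec_NxN_format_aij_list all_ij_list all_ntype_list flip st out) := by unfold Spec_NxN_format_aij_list; infer_instance

-- ===== CLAIM (what is proved, stated in full; the proofs are below) =====
def Claim_equal_NxN_format_aij_list : Prop := ∀ (all_ij_list : List (Int × Int)) (all_ntype_list : List Int) (flip : Bool) (st : Bool), Dom_NxN_format_aij_list all_ij_list all_ntype_list flip st → Pre_NxN_format_aij_list all_ij_list all_ntype_list flip st → Spec_NxN_format_aij_list all_ij_list all_ntype_list flip st (NxN_format_aij_list all_ij_list all_ntype_list flip st)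

-- ===== LEMMAS AND PROOFS =====

-- proof-side spec helpers
def pvClose (flip : Bool) (hi lo : List (Int × Int)) : List (Int × Int) :=
  if flip then hi.reverse ++ lo else hi ++ lo.reverse

def pvHi (g : List ((Int × Int) × Int)) : List (Int × Int) :=
  (g.filter (fun e => e.2 == 0)).map (fun e => e.1)
def pvLo (g : List ((Int × Int) × Int)) : List (Int × Int) :=
  (g.filter (fun e => !(e.2 == 0))).map (fun e => e.1)

def pvProcRuns (flip : Bool) : List ((Int × Int) × Int) → List (Int × Int)
  | [] => []
  | e :: rest =>
    pvClose flip (pvHi (e :: (pvSplitRun e.1.1 rest).1)) (pvLo (e :: (pvSplitRun e.1.1 rest).1))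
      ++ pvProcRuns flip (pvSplitRun e.1.1 rest).2
termination_by l => l.length
decreasing_by exact Nat.lt_succ_of_le (pvSplitRun_snd_length _ _)

def pvPaired (nt : List Int) (k : Int) : List (Int × Int) → List ((Int × Int) × Int)
  | [] => []
  | ij :: t => (ij, PySem.List.pyGetD nt k 0) :: pvPaired nt (k + 1) t

theorem pvEntries_eq (nt : List Int) (l : List (Int × Int)) (s : Int) :
    (PySem.List.enumerate l s).map (fun p => (p.2, PySem.List.pyGetD nt p.1 0))
      = pvPaired nt s l := by
  induction l generalizing s with
  | nil => simp [pvPaired, PySem.List.enumerate_nil]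
  | cons x t ih => simp [pvPaired, PySem.List.enumerate_cons, ih]

theorem pvFoldl_runs (flip : Bool) (es : List ((Int × Int) × Int)) (acc : List (Int × Int)) :
    (pvRuns es).foldl
      (fun out g =>
        let hi := (g.filter (fun e => e.2 == 0)).map (fun e => e.1)
        let lo := (g.filter (fun e => !(e.2 == 0))).map (fun e => e.1)
        out ++ (if flip then hi.reverse ++ lo else hi ++ lo.reverse))
      acc
      = acc ++ pvProcRuns flip es := by
  induction es using pvRuns.induct generalizing acc with
  | case1 => simp [pvRuns, pvProcRuns]
  | case2 e rest ih =>
    rw [pvRuns, pvProcRuns]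
    simp only [List.foldl_cons]
    rw [ih]
    simp [pvClose, pvHi, pvLo, List.append_assoc]

theorem pvB_eq (all_ij_list : List (Int × Int)) (all_ntype_list : List Int) (flip st : Bool) :
    NxN_format_aij_list_alt all_ij_list all_ntype_list flip st
      = pvProcRuns flip (pvPaired all_ntype_list 0 all_ij_list) := by
  unfold NxN_format_aij_list_alt
  rw [pvEntries_eq, pvFoldl_runs]
  simp

-- A's loop invariant: running the fold from state (new, hi, lo, k, some i0) and flushing
-- equals new ++ (the current run completed with hi/lo prefixes) ++ the remaining runs.
theorem pvA_inv (nt : List Int) (flip : Bool) (l : List (Int × Int))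
    (new hi lo : List (Int × Int)) (k i0 : Int) :
    (fun s : List (Int × Int) × List (Int × Int) × List (Int × Int) × Int × Option Int =>
       s.1 ++ (if !flip then s.2.1 ++ s.2.2.1.reverse else s.2.1.reverse ++ s.2.2.1))
      (l.foldl (pvStepA nt flip) (new, hi, lo, k, some i0))
      = new ++
        pvClose flip (hi ++ pvHi (pvSplitRun i0 (pvPaired nt k l)).1)
                     (lo ++ pvLo (pvSplitRun i0 (pvPaired nt k l)).1)
        ++ pvProcRuns flip (pvSplitRun i0 (pvPaired nt k l)).2 := by
  induction l generalizing new hi lo k i0 with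
  | nil =>
    simp [pvPaired, pvSplitRun, pvHi, pvLo, pvProcRuns, pvClose]
    cases flip <;> simp
  | cons ij t ih =>
    by_cases hkey : ij.1 = i0
    · -- same run: no flush
      have hstep : pvStepA nt flip (new, hi, lo, k, some i0) ij =
          (new,
           (if PySem.List.pyGetD nt k 0 == 0 then hi ++ [ij] else hi),
           (if PySem.List.pyGetD nt k 0 == 0 then lo else lo ++ [ij]),
           k + 1, some ij.1) := by
        simp [pvStepA, hkey]
        split <;> simp
      rw [List.foldl_cons, hstep, hkey, ih]
      simp only [pvPaired, pvSplitRun, hkey, beq_self_eq_true, if_true]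
      by_cases hnt : PySem.List.pyGetD nt k 0 = 0 <;>
        simp [hnt, pvHi, pvLo, pvClose, List.append_assoc] <;> cases flip <;> simp
    · -- new run: flush, reset, then insert ij
      have hkey' : ¬ i0 = ij.1 := fun h => hkey h.symm
      have hstep : pvStepA nt flip (new, hi, lo, k, some i0) ij =
          (new ++ (if !flip then hi ++ lo.reverse else hi.reverse ++ lo),
           (if PySem.List.pyGetD nt k 0 == 0 then [ij] else []),
           (if PySem.List.pyGetD nt k 0 == 0 then [] else [ij]),
           k + 1, some ij.1) := by
        simp [pvStepA, hkey']
        split <;> simp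
      rw [List.foldl_cons, hstep, ih]
      have hsplit : pvSplitRun i0 (pvPaired nt k (ij :: t)) =
          ([], (ij, PySem.List.pyGetD nt k 0) :: pvPaired nt (k + 1) t) := by
        simp [pvPaired, pvSplitRun, hkey]
      rw [hsplit, pvProcRuns]
      by_cases hnt : PySem.List.pyGetD nt k 0 = 0 <;>
        simp [hnt, pvHi, pvLo, pvClose, List.append_assoc] <;> cases flip <;> simp

-- ===== VERDICT (by name: the statement is the Claim_ definition above) =====
theorem NxN_format_aij_list_spec : Claim_equal_NxN_format_aij_list := by
  intro all_ij_list all_ntype_list flip st _ _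
  unfold Spec_NxN_format_aij_list
  rw [pvB_eq]
  cases all_ij_list with
  | nil =>
    cases flip <;> simp [NxN_format_aij_list, pvPaired, pvProcRuns]
  | cons ij t =>
    have hstep : pvStepA all_ntype_list flip ([], [], [], 0, none) ij =
        ([],
         (if PySem.List.pyGetD all_ntype_list 0 0 == 0 then [ij] else []),
         (if PySem.List.pyGetD all_ntype_list 0 0 == 0 then [] else [ij]),
         1, some ij.1) := by
      cases flip <;> by_cases h : PySem.List.pyGetD all_ntype_list 0 0 = 0 <;>
        simp [pvStepA, h]
    unfold NxN_format_aij_list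
    rw [List.foldl_cons, hstep]
    refine (pvA_inv all_ntype_list flip t [] _ _ 1 ij.1).trans ?_
    have hp : pvPaired all_ntype_list 0 (ij :: t) =
        (ij, PySem.List.pyGetD all_ntype_list 0 0) :: pvPaired all_ntype_list 1 t := by
      simp [pvPaired]
    rw [hp, pvProcRuns]
    by_cases hnt : PySem.List.pyGetD all_ntype_list 0 0 = 0 <;>
      simp [hnt, pvHi, pvLo, pvClose] <;> cases flip <;> simp
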